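-- pv_equiv track=rewrite | github.com/ncpcluoyin/stone | bootstrap/marcos.py | marcoNameIsOK
-- ===== SOURCE A (Python) =====
-- preDefineMarcos = (
--     "if",
--     "loop",
--     "while",
--     "for",
--     "in",
--     "else",
--     "elif"#TODO
-- )
--
-- def marcoNameIsOK(name:str):
--     if name in preDefineMarcos:
--         return False
--     nameTurnIntoList = list(name)
--     for x in range(10):
--         if nameTurnIntoList[0] == str(x):
--             return False
--     if "!" in name:
--         return False
--     if "@" in name:
--         return False
--     if "#" in name:
--         return False
--     if "$" in name:
--         return False
--     if "%" in name:
--         return False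
--     if "^" in name:
--         return False
--     if "&" in name:
--         return False
--     if "*" in name:
--         return False
--     if "(" in name:
--         return False
--     if ")" in name:
--         return False
--     if "[" in name:
--         return False
--     if "]" in name:
--         return False
--     if "{" in name:
--         return False
--     if "}" in name:
--         return False
--     if "\\" in name:
--         return False
--     if "|" in name:
--         return False
--     if "\"" in name:
--         return False
--     if "\'" in name:
--         return False
--     if ";" in name:
--         return False
--     if ":" in name:
--         return False
--     if "<" in name:
--         return False
--     if ">" in name:
--         return False
--     if "," in name:
--         return False
--     if "." in name:
--         return False
--     if "?" in name:
--         return False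
--     if "~" in name:
--         return False
--     if "`" in name:
--         return False
--     if "-" in name:
--         return False
--     if "+" in name:
--         return False
--     if "=" in name:
--         return False
--     if "/" in name:
--         return False
--     return True
-- ===== SOURCE B (Python) =====
-- RESERVED = {"if", "loop", "while", "for", "in", "else", "elif"}
-- FORBIDDEN = set("!@#$%^&*()[]{}\\|\"';:<>,.?~`-+=/")
--
-- def marcoNameIsOK(name: str):
--     if name in RESERVED:
--         return False
--     if name[0] in "0123456789":
--         return False
--     return not any(c in FORBIDDEN for c in name)
-- ===== Notes on version B (the rewrite author's own statement) =====
-- stated objective: simpler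
-- what changed: Replaces the 29 repeated whole-string substring scans (one 'if ch in name' per forbidden character) with a single pass over the characters against a precomputed forbidden set, and the explicit range(10) digit loop with a membership test of the first character.
import Mathlib
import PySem

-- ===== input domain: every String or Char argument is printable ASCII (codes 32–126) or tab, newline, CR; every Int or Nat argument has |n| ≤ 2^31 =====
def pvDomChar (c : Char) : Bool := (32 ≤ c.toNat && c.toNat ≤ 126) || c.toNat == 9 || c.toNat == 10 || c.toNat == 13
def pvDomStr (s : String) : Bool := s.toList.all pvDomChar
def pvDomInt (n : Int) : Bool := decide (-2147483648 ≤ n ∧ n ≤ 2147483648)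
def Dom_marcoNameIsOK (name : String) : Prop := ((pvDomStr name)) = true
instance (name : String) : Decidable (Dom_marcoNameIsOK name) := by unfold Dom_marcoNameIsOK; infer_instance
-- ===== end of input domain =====

-- B replaces A's 31 separate whole-string membership scans by one pass over the
-- characters against a precomputed forbidden set (objective: simpler).

-- ===== PORT A =====
def preDefineMarcos : List String := ["if", "loop", "while", "for", "in", "else", "elif"]

def marcoNameIsOK (name : String) : Bool :=
  if preDefineMarcos.contains name then false
  else
    let nameTurnIntoList := name.toList
    -- for x in range(10): if nameTurnIntoList[0] == str(x): return False
    -- (nameTurnIntoList[0] is a 1-char string in Python; compared via its char list.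
    --  On empty input Python raises IndexError; pyGet? is none there — outside Pre_.)
    if (PySem.List.pyRange 0 10 1).any (fun x =>
        (PySem.List.pyGet? nameTurnIntoList 0).map (fun c => [c]) == some (PySem.Int.toStr x).toList) then false
    else
    if PySem.Str.isIn "!" name then false else
    if PySem.Str.isIn "@" name then false else
    if PySem.Str.isIn "#" name then false else
    if PySem.Str.isIn "$" name then false else
    if PySem.Str.isIn "%" name then false else
    if PySem.Str.isIn "^" name then false else
    if PySem.Str.isIn "&" name then false else
    if PySem.Str.isIn "*" name then false else
    if PySem.Str.isIn "(" name then false else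
    if PySem.Str.isIn ")" name then false else
    if PySem.Str.isIn "[" name then false else
    if PySem.Str.isIn "]" name then false else
    if PySem.Str.isIn "{" name then false else
    if PySem.Str.isIn "}" name then false else
    if PySem.Str.isIn "\\" name then false else
    if PySem.Str.isIn "|" name then false else
    if PySem.Str.isIn "\"" name then false else
    if PySem.Str.isIn "'" name then false else
    if PySem.Str.isIn ";" name then false else
    if PySem.Str.isIn ":" name then false else
    if PySem.Str.isIn "<" name then false else
    if PySem.Str.isIn ">" name then false else
    if PySem.Str.isIn "," name then false else
    if PySem.Str.isIn "." name then false else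
    if PySem.Str.isIn "?" name then false else
    if PySem.Str.isIn "~" name then false else
    if PySem.Str.isIn "`" name then false else
    if PySem.Str.isIn "-" name then false else
    if PySem.Str.isIn "+" name then false else
    if PySem.Str.isIn "=" name then false else
    if PySem.Str.isIn "/" name then false else
    true

-- ===== PORT B =====
def reservedMarcos : PySem.Set String := PySem.Set.ofList ["if", "loop", "while", "for", "in", "else", "elif"]
def forbiddenChars : PySem.Set Char := PySem.Set.ofList ['!', '@', '#', '$', '%', '^', '&', '*', '(', ')', '[', ']', '{', '}', '\\', '|', '"', '\'', ';', ':', '<', '>', ',', '.', '?', '~', '`', '-', '+', '=', '/']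

def marcoNameIsOK_alt (name : String) : Bool :=
  if PySem.Set.contains reservedMarcos name then false
  else
    match PySem.List.pyGet? name.toList 0 with   -- name[0]; IndexError on "" (outside Pre_)
    | none => false
    | some c =>
      if ("0123456789".toList).contains c then false
      else !(name.toList.any (fun ch => PySem.Set.contains forbiddenChars ch))

-- ===== PRECONDITION & SPEC =====
-- Pre_ excludes only the empty string, on which both Pythons raise IndexError at name[0].
def Pre_marcoNameIsOK (name : String) : Prop := name ≠ ""
instance (name : String) : Decidable (Pre_marcoNameIsOK name) := by unfold Pre_marcoNameIsOK; infer_instance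
def pvWitness_marcoNameIsOK : String := ("foo")

def Spec_marcoNameIsOK (name : String) (out : Bool) : Prop := out = marcoNameIsOK_alt name
instance (name : String) (out : Bool) : Decidable (Spec_marcoNameIsOK name out) := by unfold Spec_marcoNameIsOK; infer_instance

-- ===== CLAIM (what is proved, stated in full; the proofs are below) =====
def Claim_equal_marcoNameIsOK : Prop := ∀ (name : String), Dom_marcoNameIsOK name → Pre_marcoNameIsOK name → Spec_marcoNameIsOK name (marcoNameIsOK name)

-- ===== LEMMAS AND PROOFS =====
-- the 31 forbidden characters, as the 1-char strings A tests, in A's order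
def forbStrs : List String := ["!", "@", "#", "$", "%", "^", "&", "*", "(", ")", "[", "]", "{", "}", "\\", "|", "\"", "'", ";", ":", "<", ">", ",", ".", "?", "~", "`", "-", "+", "=", "/"]

lemma mem_of_single_infix {t : String} {a : Char} {l : List Char}
    (h : t.toList <:+: l) (ht : t.toList = [a]) : a ∈ l :=
  (List.singleton_infix_iff _ _).mp (ht ▸ h)

lemma char_of_option_beq {c d : Char} {t : List Char}
    (he : ((some [c] : Option (List Char)) == some t) = true) (ht : t = [d]) : c = d := by
  subst ht; simpa using he

lemma foldr_not_any (fs : List String) (s : String) :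
    fs.foldr (fun t acc => if PySem.Str.isIn t s then false else acc) true
      = !(fs.any (fun t => PySem.Str.isIn t s)) := by
  induction fs with
  | nil => rfl
  | cons t ts ih =>
    simp only [List.foldr_cons, List.any_cons, ih]
    cases PySem.Str.isIn t s <;> simp

lemma anyForb (name : String) :
    (forbStrs.any (fun t => PySem.Str.isIn t name))
      = name.toList.any (fun ch => PySem.Set.contains forbiddenChars ch) := by
  rw [Bool.eq_iff_iff]
  simp only [List.any_eq_true, PySem.Str.isIn_iff_infix]
  constructor
  · rintro ⟨t, ht, hinf⟩
    fin_cases ht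
    · exact ⟨'!', mem_of_single_infix hinf (by decide), by decide⟩
    · exact ⟨'@', mem_of_single_infix hinf (by decide), by decide⟩
    · exact ⟨'#', mem_of_single_infix hinf (by decide), by decide⟩
    · exact ⟨'$', mem_of_single_infix hinf (by decide), by decide⟩
    · exact ⟨'%', mem_of_single_infix hinf (by decide), by decide⟩
    · exact ⟨'^', mem_of_single_infix hinf (by decide), by decide⟩
    · exact ⟨'&', mem_of_single_infix hinf (by decide), by decide⟩
    · exact ⟨'*', mem_of_single_infix hinf (by decide), by decide⟩
    · exact ⟨'(', mem_of_single_infix hinf (by decide), by decide⟩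
    · exact ⟨')', mem_of_single_infix hinf (by decide), by decide⟩
    · exact ⟨'[', mem_of_single_infix hinf (by decide), by decide⟩
    · exact ⟨']', mem_of_single_infix hinf (by decide), by decide⟩
    · exact ⟨'{', mem_of_single_infix hinf (by decide), by decide⟩
    · exact ⟨'}', mem_of_single_infix hinf (by decide), by decide⟩
    · exact ⟨'\\', mem_of_single_infix hinf (by decide), by decide⟩
    · exact ⟨'|', mem_of_single_infix hinf (by decide), by decide⟩
    · exact ⟨'"', mem_of_single_infix hinf (by decide), by decide⟩
    · exact ⟨'\'', mem_of_single_infix hinf (by decide), by decide⟩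
    · exact ⟨';', mem_of_single_infix hinf (by decide), by decide⟩
    · exact ⟨':', mem_of_single_infix hinf (by decide), by decide⟩
    · exact ⟨'<', mem_of_single_infix hinf (by decide), by decide⟩
    · exact ⟨'>', mem_of_single_infix hinf (by decide), by decide⟩
    · exact ⟨',', mem_of_single_infix hinf (by decide), by decide⟩
    · exact ⟨'.', mem_of_single_infix hinf (by decide), by decide⟩
    · exact ⟨'?', mem_of_single_infix hinf (by decide), by decide⟩
    · exact ⟨'~', mem_of_single_infix hinf (by decide), by decide⟩
    · exact ⟨'`', mem_of_single_infix hinf (by decide), by decide⟩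
    · exact ⟨'-', mem_of_single_infix hinf (by decide), by decide⟩
    · exact ⟨'+', mem_of_single_infix hinf (by decide), by decide⟩
    · exact ⟨'=', mem_of_single_infix hinf (by decide), by decide⟩
    · exact ⟨'/', mem_of_single_infix hinf (by decide), by decide⟩
  · rintro ⟨ch, hch, hf⟩
    have hmem : ch ∈ (['!', '@', '#', '$', '%', '^', '&', '*', '(', ')', '[', ']', '{', '}', '\\', '|', '"', '\'', ';', ':', '<', '>', ',', '.', '?', '~', '`', '-', '+', '=', '/'] : List Char) := by
      simpa [forbiddenChars, PySem.Set.contains_iff] using hf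
    refine ⟨String.ofList [ch], ?_, ?_⟩
    · fin_cases hmem <;> decide
    · rw [String.toList_ofList]
      exact (List.singleton_infix_iff _ _).mpr hch

lemma digit_eq (c : Char) :
    ((PySem.List.pyRange 0 10 1).any (fun x =>
        (some [c] : Option (List Char)) == some (PySem.Int.toStr x).toList))
      = ("0123456789".toList).contains c := by
  rw [show ("0123456789".toList) = ['0', '1', '2', '3', '4', '5', '6', '7', '8', '9'] from by decide]
  have hr : PySem.List.pyRange 0 10 1 = [0,1,2,3,4,5,6,7,8,9] := by decide
  rw [Bool.eq_iff_iff, hr]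
  simp only [List.any_eq_true]
  constructor
  · rintro ⟨x, hx, he⟩
    fin_cases hx
    · rw [char_of_option_beq he (by decide : (PySem.Int.toStr 0).toList = ['0'])]; decide
    · rw [char_of_option_beq he (by decide : (PySem.Int.toStr 1).toList = ['1'])]; decide
    · rw [char_of_option_beq he (by decide : (PySem.Int.toStr 2).toList = ['2'])]; decide
    · rw [char_of_option_beq he (by decide : (PySem.Int.toStr 3).toList = ['3'])]; decide
    · rw [char_of_option_beq he (by decide : (PySem.Int.toStr 4).toList = ['4'])]; decide
    · rw [char_of_option_beq he (by decide : (PySem.Int.toStr 5).toList = ['5'])]; decide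
    · rw [char_of_option_beq he (by decide : (PySem.Int.toStr 6).toList = ['6'])]; decide
    · rw [char_of_option_beq he (by decide : (PySem.Int.toStr 7).toList = ['7'])]; decide
    · rw [char_of_option_beq he (by decide : (PySem.Int.toStr 8).toList = ['8'])]; decide
    · rw [char_of_option_beq he (by decide : (PySem.Int.toStr 9).toList = ['9'])]; decide
  · intro hc
    have hm : c ∈ (['0', '1', '2', '3', '4', '5', '6', '7', '8', '9'] : List Char) := by simpa using hc
    fin_cases hm
    · exact ⟨0, by decide, by decide⟩
    · exact ⟨1, by decide, by decide⟩
    · exact ⟨2, by decide, by decide⟩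
    · exact ⟨3, by decide, by decide⟩
    · exact ⟨4, by decide, by decide⟩
    · exact ⟨5, by decide, by decide⟩
    · exact ⟨6, by decide, by decide⟩
    · exact ⟨7, by decide, by decide⟩
    · exact ⟨8, by decide, by decide⟩
    · exact ⟨9, by decide, by decide⟩

lemma chain_eq (name : String) :
    (     if PySem.Str.isIn "!" name then false else
     if PySem.Str.isIn "@" name then false else
     if PySem.Str.isIn "#" name then false else
     if PySem.Str.isIn "$" name then false else
     if PySem.Str.isIn "%" name then false else
     if PySem.Str.isIn "^" name then false else
     if PySem.Str.isIn "&" name then false else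
     if PySem.Str.isIn "*" name then false else
     if PySem.Str.isIn "(" name then false else
     if PySem.Str.isIn ")" name then false else
     if PySem.Str.isIn "[" name then false else
     if PySem.Str.isIn "]" name then false else
     if PySem.Str.isIn "{" name then false else
     if PySem.Str.isIn "}" name then false else
     if PySem.Str.isIn "\\" name then false else
     if PySem.Str.isIn "|" name then false else
     if PySem.Str.isIn "\"" name then false else
     if PySem.Str.isIn "'" name then false else
     if PySem.Str.isIn ";" name then false else
     if PySem.Str.isIn ":" name then false else
     if PySem.Str.isIn "<" name then false else
     if PySem.Str.isIn ">" name then false else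
     if PySem.Str.isIn "," name then false else
     if PySem.Str.isIn "." name then false else
     if PySem.Str.isIn "?" name then false else
     if PySem.Str.isIn "~" name then false else
     if PySem.Str.isIn "`" name then false else
     if PySem.Str.isIn "-" name then false else
     if PySem.Str.isIn "+" name then false else
     if PySem.Str.isIn "=" name then false else
     if PySem.Str.isIn "/" name then false else
     true)
      = !(name.toList.any (fun ch => PySem.Set.contains forbiddenChars ch)) := by
  have h : (      if PySem.Str.isIn "!" name then false else
      if PySem.Str.isIn "@" name then false else
      if PySem.Str.isIn "#" name then false else
      if PySem.Str.isIn "$" name then false else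
      if PySem.Str.isIn "%" name then false else
      if PySem.Str.isIn "^" name then false else
      if PySem.Str.isIn "&" name then false else
      if PySem.Str.isIn "*" name then false else
      if PySem.Str.isIn "(" name then false else
      if PySem.Str.isIn ")" name then false else
      if PySem.Str.isIn "[" name then false else
      if PySem.Str.isIn "]" name then false else
      if PySem.Str.isIn "{" name then false else
      if PySem.Str.isIn "}" name then false else
      if PySem.Str.isIn "\\" name then false else
      if PySem.Str.isIn "|" name then false else
      if PySem.Str.isIn "\"" name then false else
      if PySem.Str.isIn "'" name then false else
      if PySem.Str.isIn ";" name then false else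
      if PySem.Str.isIn ":" name then false else
      if PySem.Str.isIn "<" name then false else
      if PySem.Str.isIn ">" name then false else
      if PySem.Str.isIn "," name then false else
      if PySem.Str.isIn "." name then false else
      if PySem.Str.isIn "?" name then false else
      if PySem.Str.isIn "~" name then false else
      if PySem.Str.isIn "`" name then false else
      if PySem.Str.isIn "-" name then false else
      if PySem.Str.isIn "+" name then false else
      if PySem.Str.isIn "=" name then false else
      if PySem.Str.isIn "/" name then false else
      true)
      = forbStrs.foldr (fun t acc => if PySem.Str.isIn t name then false else acc) true := rfl
  rw [h, foldr_not_any, anyForb]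

lemma reserved_eq (name : String) :
    PySem.Set.contains reservedMarcos name = preDefineMarcos.contains name := by
  rw [PySem.Set.contains_eq_listContains]
  rw [show (reservedMarcos : List String) = preDefineMarcos from by decide]

-- ===== VERDICT (by name: the statement is the Claim_ definition above) =====
theorem marcoNameIsOK_spec : Claim_equal_marcoNameIsOK := by
  intro name _ hpre
  unfold Spec_marcoNameIsOK
  have hnil : name.toList ≠ [] := fun hd => hpre (String.toList_eq_nil_iff.mp hd)
  obtain ⟨c, rest, hl⟩ : ∃ c rest, name.toList = c :: rest := by
    cases h : name.toList with
    | nil => exact absurd h hnil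
    | cons c rest => exact ⟨c, rest, rfl⟩
  have hget : PySem.List.pyGet? name.toList (0 : Int) = some c := by
    rw [hl]; simp [PySem.List.pyGet?, PySem.List.pyIdx?]
  show marcoNameIsOK name = marcoNameIsOK_alt name
  unfold marcoNameIsOK marcoNameIsOK_alt
  rw [reserved_eq]
  cases hr : preDefineMarcos.contains name with
  | true => simp
  | false =>
    simp only [Bool.false_eq_true, if_false, hget, Option.map_some]
    rw [digit_eq c, chain_eq name]
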